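-- pv_equiv track=rewrite | github.com/blinkysc/azerothMCP | sai_comment_generator.py | _get_unit_flags_string
-- ===== SOURCE A (Python) =====
-- UNIT_FLAGS = {
--     "SERVER_CONTROLLED": 0x00000001, "NON_ATTACKABLE": 0x00000002,
--     "DISABLE_MOVE": 0x00000004, "PVP_ATTACKABLE": 0x00000008,
--     "RENAME": 0x00000010, "PREPARATION": 0x00000020,
--     "NOT_ATTACKABLE_1": 0x00000080, "IMMUNE_TO_PC": 0x00000100,
--     "IMMUNE_TO_NPC": 0x00000200, "LOOTING": 0x00000400,
--     "PET_IN_COMBAT": 0x00000800, "PVP": 0x00001000,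
--     "SILENCED": 0x00002000, "PACIFIED": 0x00020000,
--     "STUNNED": 0x00040000, "IN_COMBAT": 0x00080000,
--     "DISARMED": 0x00200000, "CONFUSED": 0x00400000,
--     "FLEEING": 0x00800000, "PLAYER_CONTROLLED": 0x01000000,
--     "NOT_SELECTABLE": 0x02000000, "SKINNABLE": 0x04000000,
--     "MOUNT": 0x08000000, "SHEATHE": 0x40000000,
-- }
--
-- def _get_unit_flags_string(flags: int) -> str:
--     """Convert unit flags to human-readable string."""
--     flag_names = {
--         UNIT_FLAGS["SERVER_CONTROLLED"]: "Server Controlled",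
--         UNIT_FLAGS["NON_ATTACKABLE"]: "Not Attackable",
--         UNIT_FLAGS["DISABLE_MOVE"]: "Disable Movement",
--         UNIT_FLAGS["PVP_ATTACKABLE"]: "PvP Attackable",
--         UNIT_FLAGS["RENAME"]: "Rename",
--         UNIT_FLAGS["PREPARATION"]: "Preparation",
--         UNIT_FLAGS["NOT_ATTACKABLE_1"]: "Not Attackable",
--         UNIT_FLAGS["IMMUNE_TO_PC"]: "Immune To Players",
--         UNIT_FLAGS["IMMUNE_TO_NPC"]: "Immune To NPC's",
--         UNIT_FLAGS["LOOTING"]: "Looting",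
--         UNIT_FLAGS["PET_IN_COMBAT"]: "Pet In Combat",
--         UNIT_FLAGS["PVP"]: "PvP",
--         UNIT_FLAGS["SILENCED"]: "Silenced",
--         UNIT_FLAGS["PACIFIED"]: "Pacified",
--         UNIT_FLAGS["STUNNED"]: "Stunned",
--         UNIT_FLAGS["IN_COMBAT"]: "In Combat",
--         UNIT_FLAGS["DISARMED"]: "Disarmed",
--         UNIT_FLAGS["CONFUSED"]: "Confused",
--         UNIT_FLAGS["FLEEING"]: "Fleeing",
--         UNIT_FLAGS["PLAYER_CONTROLLED"]: "Player Controlled",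
--         UNIT_FLAGS["NOT_SELECTABLE"]: "Not Selectable",
--         UNIT_FLAGS["SKINNABLE"]: "Skinnable",
--         UNIT_FLAGS["MOUNT"]: "Mounted",
--         UNIT_FLAGS["SHEATHE"]: "Sheathed",
--     }
--     parts = [name for flag, name in flag_names.items() if flags & flag]
--     return " & ".join(parts) if parts else ""
-- ===== SOURCE B (Python) =====
-- _BIT_NAMES = {
--     0: "Server Controlled", 1: "Not Attackable", 2: "Disable Movement",
--     3: "PvP Attackable", 4: "Rename", 5: "Preparation",
--     7: "Not Attackable", 8: "Immune To Players", 9: "Immune To NPC's",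
--     10: "Looting", 11: "Pet In Combat", 12: "PvP", 13: "Silenced",
--     17: "Pacified", 18: "Stunned", 19: "In Combat", 21: "Disarmed",
--     22: "Confused", 23: "Fleeing", 24: "Player Controlled",
--     25: "Not Selectable", 26: "Skinnable", 27: "Mounted", 30: "Sheathed",
-- }
--
-- # OR of all known flag bits (bits 0-5, 7-13, 17-19, 21-27, 30)
-- _KNOWN_MASK = 0x4FEE3FBF
--
--
-- def _get_unit_flags_string(flags: int) -> str:
--     # keep only the known bits, then peel off one set bit per iteration
--     # (lowest first), appending its name to the result string
--     rest = flags & _KNOWN_MASK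
--     out = ""
--     while rest:
--         low = rest & -rest
--         name = _BIT_NAMES[low.bit_length() - 1]
--         out = name if not out else out + " & " + name
--         rest ^= low
--     return out
-- ===== Notes on version B (the rewrite author's own statement) =====
-- stated objective: alternative
-- what changed: B masks the input to the known flag bits once and then runs a low-bit-extraction loop (low = rest & -rest; rest ^= low), building the joined string incrementally with a name looked up by bit index, instead of A's scan of the whole flag-value table testing flags & flag per entry and joining a list at the end; B's loop runs once per set flag rather than once per table entry.
import Mathlib
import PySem

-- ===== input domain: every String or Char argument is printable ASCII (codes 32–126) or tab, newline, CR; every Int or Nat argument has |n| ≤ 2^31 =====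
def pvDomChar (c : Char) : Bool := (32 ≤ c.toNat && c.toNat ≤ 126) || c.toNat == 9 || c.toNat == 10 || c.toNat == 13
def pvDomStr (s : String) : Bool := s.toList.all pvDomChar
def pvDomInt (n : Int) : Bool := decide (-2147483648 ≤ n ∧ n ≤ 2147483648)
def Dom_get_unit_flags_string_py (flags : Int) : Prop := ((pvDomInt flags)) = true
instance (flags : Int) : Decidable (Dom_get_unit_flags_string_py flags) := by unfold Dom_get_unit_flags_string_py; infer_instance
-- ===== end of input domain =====

-- B replaces A's scan of the 24-entry flag table with a low-bit-extraction loop: it masks the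
-- input to the known bits once and then peels off one set bit per iteration (rest & -rest),
-- looking the bit's name up by bit index and appending it to a growing string (alternative
-- decomposition; the loop runs once per set flag instead of once per table entry).

-- ===== PORT A =====
-- A's flag_names dict, values already substituted from UNIT_FLAGS (insertion order kept)
def pvFlagNamesA : List (Int × String) :=
  [(0x00000001, "Server Controlled"), (0x00000002, "Not Attackable"),
   (0x00000004, "Disable Movement"), (0x00000008, "PvP Attackable"),
   (0x00000010, "Rename"), (0x00000020, "Preparation"),
   (0x00000080, "Not Attackable"), (0x00000100, "Immune To Players"),
   (0x00000200, "Immune To NPC's"), (0x00000400, "Looting"),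
   (0x00000800, "Pet In Combat"), (0x00001000, "PvP"),
   (0x00002000, "Silenced"), (0x00020000, "Pacified"),
   (0x00040000, "Stunned"), (0x00080000, "In Combat"),
   (0x00200000, "Disarmed"), (0x00400000, "Confused"),
   (0x00800000, "Fleeing"), (0x01000000, "Player Controlled"),
   (0x02000000, "Not Selectable"), (0x04000000, "Skinnable"),
   (0x08000000, "Mounted"), (0x40000000, "Sheathed")]

def get_unit_flags_string_py (flags : Int) : String :=
  -- parts = [name for flag, name in flag_names.items() if flags & flag]
  let parts := (pvFlagNamesA.filter (fun p => decide (PySem.Int.band flags p.1 ≠ 0))).map (fun p => p.2)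
  if parts.isEmpty then "" else PySem.Str.join " & " parts

-- ===== PORT B =====
-- B's _BIT_NAMES: bit index → name
def pvBitNames : PySem.Dict Int String := PySem.Dict.mk
  [(0, "Server Controlled"), (1, "Not Attackable"), (2, "Disable Movement"),
   (3, "PvP Attackable"), (4, "Rename"), (5, "Preparation"),
   (7, "Not Attackable"), (8, "Immune To Players"), (9, "Immune To NPC's"),
   (10, "Looting"), (11, "Pet In Combat"), (12, "PvP"), (13, "Silenced"),
   (17, "Pacified"), (18, "Stunned"), (19, "In Combat"), (21, "Disarmed"),
   (22, "Confused"), (23, "Fleeing"), (24, "Player Controlled"),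
   (25, "Not Selectable"), (26, "Skinnable"), (27, "Mounted"), (30, "Sheathed")]

-- _KNOWN_MASK = 0x4FEE3FBF
def pvMask : Int := 0x4FEE3FBF

-- B's while loop; the fuel (31, an upper bound on the set bits of the masked value, which the
-- loop strictly shrinks) only makes the recursion total and never changes the computation.
-- _BIT_NAMES[low.bit_length() - 1] is ported with .getD "": the key is always present, since
-- rest only carries bits of _KNOWN_MASK, so the default is never taken (Python never raises here).
def pvLoopB : Nat → Int → String → String
  | 0, _, out => out
  | f + 1, rest, out =>
    if rest ≠ 0 then
      let low := PySem.Int.band rest (-rest)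
      let name := (PySem.Dict.get? pvBitNames ((PySem.Int.bitLength low : Int) - 1)).getD ""
      pvLoopB f (PySem.Int.bxor rest low) (if out = "" then name else out ++ " & " ++ name)
    else out

def get_unit_flags_string_py_alt (flags : Int) : String :=
  pvLoopB 31 (PySem.Int.band flags pvMask) ""

-- ===== PRECONDITION & SPEC =====
def Spec_get_unit_flags_string_py (flags : Int) (out : String) : Prop := out = get_unit_flags_string_py_alt flags
instance (flags : Int) (out : String) : Decidable (Spec_get_unit_flags_string_py flags out) := by unfold Spec_get_unit_flags_string_py; infer_instance

-- ===== CLAIM (what is proved, stated in full; the proofs are below) =====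
def Claim_equal_get_unit_flags_string_py : Prop := ∀ (flags : Int), Dom_get_unit_flags_string_py flags → Spec_get_unit_flags_string_py flags (get_unit_flags_string_py flags)

-- ===== LEMMAS AND PROOFS =====

-- B's step that appends one name to the output string
def pvG (out name : String) : String := if out = "" then name else out ++ " & " ++ name

-- B's bit table at Nat keys, for the loop invariant (same pairs as pvBitNames's list)
def pvTableN : List (Nat × String) :=
  [(0, "Server Controlled"), (1, "Not Attackable"), (2, "Disable Movement"),
   (3, "PvP Attackable"), (4, "Rename"), (5, "Preparation"),
   (7, "Not Attackable"), (8, "Immune To Players"), (9, "Immune To NPC's"),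
   (10, "Looting"), (11, "Pet In Combat"), (12, "PvP"), (13, "Silenced"),
   (17, "Pacified"), (18, "Stunned"), (19, "In Combat"), (21, "Disarmed"),
   (22, "Confused"), (23, "Fleeing"), (24, "Player Controlled"),
   (25, "Not Selectable"), (26, "Skinnable"), (27, "Mounted"), (30, "Sheathed")]

-- disjoint bits add like xor
theorem pvAddXor : ∀ a b : Nat, a &&& b = 0 → a + b = a ^^^ b := by
  intro a
  induction a using Nat.binaryRec with
  | zero => simp
  | bit a1 a2 ih =>
    intro b hb
    obtain ⟨b1, b2, rfl⟩ : ∃ b1 b2, b = Nat.bit b1 b2 :=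
      ⟨b.bodd, b.div2, by have := Nat.bodd_add_div2 b; simp [Nat.bit_val]; omega⟩
    rw [Nat.land_bit] at hb
    rw [Nat.xor_bit]
    have h2 : a2 &&& b2 = 0 := by
      have := congrArg Nat.div2 hb
      simpa [Nat.bit_div_two] using this
    have h1 : (a1 && b1) = false := by
      have := congrArg Nat.bodd hb
      cases a1 <;> cases b1 <;> simp_all [Nat.bit_val]
    have key := ih b2 h2
    rcases a1 <;> rcases b1 <;> simp only [Nat.bit_val, Bool.toNat_true, Bool.toNat_false,
      bne_self_eq_false, Bool.bne_false, Bool.false_bne] <;>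
      first
        | omega
        | (exact absurd h1 (by simp))

-- clearing a submask is xor with it
theorem pvSubXor (x y : Nat) : x - (x &&& y) = x ^^^ (x &&& y) := by
  have hd : (x ^^^ (x &&& y)) &&& (x &&& y) = 0 := by
    apply Nat.eq_of_testBit_eq
    intro j
    simp only [Nat.testBit_land, Nat.testBit_xor, Nat.zero_testBit]
    cases x.testBit j <;> cases y.testBit j <;> rfl
  have hsum := pvAddXor _ _ hd
  rw [Nat.xor_xor_cancel_right] at hsum
  omega

theorem pvTestBitSub (x y j : Nat) :
    (x - (x &&& y)).testBit j = (x.testBit j && !(y.testBit j)) := by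
  rw [pvSubXor]
  simp only [Nat.testBit_xor, Nat.testBit_land]
  cases x.testBit j <;> cases y.testBit j <;> rfl

-- flags & 2^k ≠ 0 iff bit k survives in flags & M, for any mask M that has bit k
theorem pvBandBitIff (flags : Int) (M k : Nat) (hk : M.testBit k = true) :
    (PySem.Int.band flags ((2 : Int) ^ k) ≠ 0) ↔
      ((PySem.Int.band flags (M : Int)).toNat.testBit k = true) := by
  have h2k : ((2 : Int) ^ k) = ((2 ^ k : Nat) : Int) := by push_cast; ring
  by_cases hf : 0 ≤ flags
  · rw [h2k, PySem.Int.band_of_nonneg hf (by positivity),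
        PySem.Int.band_of_nonneg hf (Int.natCast_nonneg M)]
    simp only [Int.toNat_natCast]
    rw [Nat.and_two_pow]
    simp only [Nat.testBit_land, hk, Bool.and_true]
    cases h : flags.toNat.testBit k <;> simp
  · have hnot := hf
    rw [h2k]
    simp only [PySem.Int.band, if_neg hnot, if_pos (Int.natCast_nonneg (2 ^ k)),
      if_pos (Int.natCast_nonneg M), Int.toNat_natCast]
    rw [pvTestBitSub]
    simp only [hk, Bool.true_and]
    rw [Nat.land_comm (2 ^ k), Nat.and_two_pow]
    cases h : (-flags - 1).toNat.testBit k <;>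
      simp

-- every bit of flags & M is a bit of M
theorem pvBitsLe (flags : Int) (M j : Nat)
    (h : (PySem.Int.band flags (M : Int)).toNat.testBit j = true) : M.testBit j = true := by
  by_cases hf : 0 ≤ flags
  · rw [PySem.Int.band_of_nonneg hf (Int.natCast_nonneg M)] at h
    simp only [Int.toNat_natCast, Nat.testBit_land, Bool.and_eq_true] at h
    exact h.2
  · have hnot := hf
    simp only [PySem.Int.band, if_neg hnot, if_pos (Int.natCast_nonneg M),
      Int.toNat_natCast] at h
    rw [pvTestBitSub] at h
    simp only [Bool.and_eq_true] at h
    exact h.1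

theorem pvBandNonneg (flags : Int) (M : Nat) : 0 ≤ PySem.Int.band flags (M : Int) := by
  by_cases hf : 0 ≤ flags
  · rw [PySem.Int.band_of_nonneg hf (Int.natCast_nonneg M)]; positivity
  · have hnot := hf
    simp only [PySem.Int.band, if_neg hnot, if_pos (Int.natCast_nonneg M)]
    positivity

-- n & (n-1) for n = 2^(k+1)*h + 2^k clears the lowest set bit
theorem pvLandPred (k h : Nat) :
    (2 ^ (k + 1) * h + 2 ^ k) &&& (2 ^ (k + 1) * h + 2 ^ k - 1) = 2 ^ (k + 1) * h := by
  have hlt : (2 : Nat) ^ k < 2 ^ (k + 1) := Nat.pow_lt_pow_succ (by norm_num)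
  have hpos : 0 < (2 : Nat) ^ k := Nat.two_pow_pos k
  have hgen : ∀ x y : Nat, 0 < y → x + y - 1 = x + (y - 1) := by intro x y hy; omega
  rw [hgen _ _ hpos]
  apply Nat.eq_of_testBit_eq
  intro j
  rw [Nat.testBit_land, Nat.testBit_two_pow_mul_add _ hlt,
    Nat.testBit_two_pow_mul_add _ (by omega), Nat.testBit_two_pow_mul]
  by_cases hj : j < k + 1
  · simp only [if_pos hj, Nat.testBit_two_pow, Nat.testBit_two_pow_sub_one]
    simp only [ge_iff_le, show ¬ (k + 1 ≤ j) by omega, decide_false, Bool.false_and]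
    cases hd : (decide (k = j)) <;> cases hd2 : (decide (j < k)) <;> simp_all
  · simp only [if_neg hj, ge_iff_le, show k + 1 ≤ j by omega, decide_true, Bool.true_and]
    cases h.testBit (j - (k + 1)) <;> rfl

-- rest & -rest on a positive value, reduced to Nat arithmetic
theorem pvBandNegNat (n : Nat) (hpos : 0 < n) :
    PySem.Int.band (n : Int) (-(n : Int)) = ((n - (n &&& (n - 1)) : Nat) : Int) := by
  simp only [PySem.Int.band]
  rw [if_pos (by positivity), if_neg (by omega)]
  have h1 : ((n : Int)).toNat = n := Int.toNat_natCast n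
  have h2 : (- -(n : Int) - 1).toNat = n - 1 := by omega
  rw [h1, h2]

-- rest & -rest is the lowest set bit
theorem pvLowbitBand (k h : Nat) :
    PySem.Int.band ((2 ^ (k + 1) * h + 2 ^ k : Nat) : Int)
      (-((2 ^ (k + 1) * h + 2 ^ k : Nat) : Int)) = ((2 ^ k : Nat) : Int) := by
  have hpos : 0 < 2 ^ (k + 1) * h + 2 ^ k := by
    have := Nat.two_pow_pos k; omega
  rw [pvBandNegNat _ hpos, pvLandPred]
  congr 1
  rw [Nat.add_sub_cancel_left]

-- removing the lowest set bit by xor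
theorem pvXorLow (k h : Nat) :
    PySem.Int.bxor ((2 ^ (k + 1) * h + 2 ^ k : Nat) : Int) ((2 ^ k : Nat) : Int) =
      ((2 ^ (k + 1) * h : Nat) : Int) := by
  rw [PySem.Int.bxor_natCast]
  congr 1
  have hd : (2 ^ (k + 1) * h) &&& (2 ^ k) = 0 := by
    rw [Nat.and_two_pow]
    simp [Nat.testBit_two_pow_mul]
  have := pvAddXor _ _ hd
  rw [this, Nat.xor_xor_cancel_right]

-- bit_length of a power of two
theorem pvBitLenPow : ∀ k : Nat, PySem.Int.bitLength ((2 ^ k : Nat) : Int) = k + 1 := by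
  intro k
  induction k with
  | zero => decide
  | succ k ih =>
    rw [PySem.Int.bitLength_natCast (Nat.two_pow_pos _)]
    rw [Nat.pow_succ, Nat.mul_div_cancel _ (by norm_num)]
    omega

-- the loop invariant: over a strictly increasing bit table covering all set bits of n,
-- pvLoopB appends exactly the names of the set bits, lowest first
-- one unfolding step of B's while loop
theorem pvLoopB_succ (f : Nat) (rest : Int) (out : String) (h : rest ≠ 0) :
    pvLoopB (f + 1) rest out =
      pvLoopB f (PySem.Int.bxor rest (PySem.Int.band rest (-rest)))
        (if out = "" then
          (PySem.Dict.get? pvBitNames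
            ((PySem.Int.bitLength (PySem.Int.band rest (-rest)) : Int) - 1)).getD ""
         else out ++ " & " ++
          (PySem.Dict.get? pvBitNames
            ((PySem.Int.bitLength (PySem.Int.band rest (-rest)) : Int) - 1)).getD "") := by
  simp [pvLoopB, h]

theorem pvLoopSpec : ∀ (d : List (Nat × String)) (f : Nat) (n : Nat) (out : String),
    d.length ≤ f →
    (d.map Prod.fst).Pairwise (· < ·) →
    (∀ j, n.testBit j = true → j ∈ d.map Prod.fst) →
    (∀ p ∈ d, PySem.Dict.get? pvBitNames ((p.1 : Nat) : Int) = some p.2) →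
    pvLoopB f ((n : Nat) : Int) out =
      List.foldl pvG out ((d.filter (fun p => n.testBit p.1)).map (fun p => p.2)) := by
  intro d
  induction d with
  | nil =>
    intro f n out _ _ hbits _
    have hn : n = 0 := Nat.eq_of_testBit_eq fun j => by
      cases h : n.testBit j
      · simp [Nat.zero_testBit]
      · exact absurd (hbits j h) (by simp)
    subst hn
    cases f <;> simp [pvLoopB]
  | cons p d' ih =>
    obtain ⟨k, name⟩ := p
    intro f n out hf hpair hbits hlook
    simp only [List.map_cons, List.pairwise_cons] at hpair
    obtain ⟨hkless, hpair'⟩ := hpair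
    cases f with
    | zero => simp at hf
    | succ f' =>
      have hlt : (2 : Nat) ^ k < 2 ^ (k + 1) := Nat.pow_lt_pow_succ (by norm_num)
      by_cases hbk : n.testBit k = true
      · -- the lowest set bit of n is k
        have hlow : ∀ j, j < k → n.testBit j = false := by
          intro j hj
          cases h : n.testBit j
          · rfl
          · rcases List.mem_cons.mp (hbits j h) with rfl | hmem
            · omega
            · exact absurd (hkless j hmem) (by omega)
        have hmod : n % 2 ^ (k + 1) = 2 ^ k := by
          apply Nat.eq_of_testBit_eq
          intro j
          rw [Nat.testBit_mod_two_pow, Nat.testBit_two_pow]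
          by_cases hj : j < k + 1
          · by_cases hjk : j = k
            · subst hjk; simp [hj, hbk]
            · simp [hj, hlow j (by omega), show ¬ (k = j) by omega]
          · have hkj : ¬ (k = j) := by omega
            simp [hj, hkj]
        have hdecomp : n = 2 ^ (k + 1) * (n / 2 ^ (k + 1)) + 2 ^ k := by
          conv_lhs => rw [← Nat.div_add_mod n (2 ^ (k + 1))]
          rw [hmod]
        have hne : ((n : Nat) : Int) ≠ 0 := by
          have h0 : n ≠ 0 := by
            intro h0; rw [h0, Nat.zero_testBit] at hbk; exact Bool.false_ne_true hbk
          exact_mod_cast h0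
        rw [pvLoopB_succ _ _ _ hne]
        rw [show ((n : Nat) : Int) = ((2 ^ (k + 1) * (n / 2 ^ (k + 1)) + 2 ^ k : Nat) : Int) by
          exact congrArg (fun m : Nat => (m : Int)) hdecomp]
        rw [pvLowbitBand, pvXorLow, pvBitLenPow]
        rw [show (((k + 1 : Nat) : Int) - 1) = ((k : Nat) : Int) by push_cast; ring]
        rw [hlook ⟨k, name⟩ (by simp)]
        rw [List.filter_cons_of_pos (by simpa using hbk), List.map_cons, List.foldl_cons]
        have hfilter :
            d'.filter (fun p => n.testBit p.1) =
              d'.filter (fun p => (2 ^ (k + 1) * (n / 2 ^ (k + 1))).testBit p.1) := by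
          apply List.filter_congr
          intro p hp
          have hkp : k < p.1 := hkless p.1 (List.mem_map_of_mem hp)
          rw [Nat.testBit_two_pow_mul]
          conv_lhs => rw [hdecomp]
          rw [Nat.testBit_two_pow_mul_add _ hlt]
          simp [show ¬ (p.1 < k + 1) by omega, show k + 1 ≤ p.1 by omega]
        rw [hfilter]
        rw [ih f' (2 ^ (k + 1) * (n / 2 ^ (k + 1))) _ (by simpa using hf) hpair'
          (by
            intro j hj
            rw [Nat.testBit_two_pow_mul] at hj
            simp only [Bool.and_eq_true, decide_eq_true_eq] at hj
            have hjn : n.testBit j = true := by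
              conv_lhs => rw [hdecomp]
              rw [Nat.testBit_two_pow_mul_add _ hlt]
              simp [show ¬ (j < k + 1) by omega, hj.2]
            rcases List.mem_cons.mp (hbits j hjn) with rfl | hmem
            · omega
            · exact hmem)
          (fun p hp => hlook p (List.mem_cons_of_mem _ hp))]
        rfl
      · -- bit k of n is clear: the head entry contributes nothing
        rw [List.filter_cons_of_neg (by simpa using hbk)]
        exact ih (f' + 1) n out (by simp at hf; omega) hpair'
          (by
            intro j hj
            rcases List.mem_cons.mp (hbits j hj) with rfl | hmem
            · exact absurd hj hbk
            · exact hmem)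
          (fun p hp => hlook p (List.mem_cons_of_mem _ hp))

-- suffix of a joined string after its first element
def pvSuffix : List String → String
  | [] => ""
  | p :: ps => " & " ++ p ++ pvSuffix ps

theorem pvFoldSuffix : ∀ (ps : List String) (out : String), out ≠ "" →
    List.foldl pvG out ps = out ++ pvSuffix ps := by
  intro ps
  induction ps with
  | nil => intro out h; simp [pvSuffix]
  | cons q qs ih =>
    intro out h
    rw [List.foldl_cons]
    have hg : pvG out q = out ++ " & " ++ q := by simp [pvG, h]
    rw [hg, ih _ (by
      intro hc
      apply h
      have := congrArg String.toList hc
      simp only [String.toList_append] at this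
      rcases List.append_eq_nil_iff.mp (List.append_eq_nil_iff.mp this).1 with ⟨h1, _⟩
      exact String.toList_inj.mp (by simp [h1]))]
    simp [pvSuffix, String.append_assoc]

theorem pvInterCons (sep : List Char) (x y : List Char) (ys : List (List Char)) :
    sep.intercalate (x :: y :: ys) = x ++ sep ++ sep.intercalate (y :: ys) := by
  simp [List.intercalate, List.intersperse]

theorem pvJoinSuffix : ∀ (ps : List String) (p : String),
    PySem.Str.join " & " (p :: ps) = p ++ pvSuffix ps := by
  intro ps
  induction ps with
  | nil =>
    intro p
    show String.ofList (List.intercalate _ [p.toList]) = _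
    simp [List.intercalate, pvSuffix]
  | cons q qs ih =>
    intro p
    show String.ofList (List.intercalate _ (p.toList :: q.toList :: List.map String.toList qs)) = _
    rw [pvInterCons]
    apply String.toList_inj.mp
    rw [String.toList_ofList]
    have hq := congrArg String.toList (ih q)
    simp only [PySem.Str.join, PySem.Chars.join, String.toList_ofList, List.map_cons] at hq
    rw [show " & ".toList = [' ', '&', ' '] from rfl] at hq
    simp [pvSuffix, String.toList_append, hq]

theorem pvFoldJoin (ps : List String) (hne : ∀ s ∈ ps, s ≠ "") :
    List.foldl pvG "" ps = if ps.isEmpty then "" else PySem.Str.join " & " ps := by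
  cases ps with
  | nil => simp
  | cons p ps =>
    rw [List.foldl_cons]
    have hg : pvG "" p = p := by simp [pvG]
    rw [hg, pvFoldSuffix ps p (hne p (by simp)), pvJoinSuffix]
    simp

-- assembling both sides over the concrete table
theorem pvMain (flags : Int) :
    get_unit_flags_string_py flags = get_unit_flags_string_py_alt flags := by
  unfold get_unit_flags_string_py get_unit_flags_string_py_alt
  have hmask : pvMask = ((0x4FEE3FBF : Nat) : Int) := by decide
  have hband : PySem.Int.band flags pvMask =
      (((PySem.Int.band flags ((0x4FEE3FBF : Nat) : Int)).toNat : Nat) : Int) := by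
    rw [hmask, Int.toNat_of_nonneg (pvBandNonneg flags 0x4FEE3FBF)]
  set n : Nat := (PySem.Int.band flags ((0x4FEE3FBF : Nat) : Int)).toNat with hn
  -- B's loop computes the fold of the names of the set bits of n
  have hbits : ∀ j, n.testBit j = true → j ∈ pvTableN.map Prod.fst := by
    intro j hj
    have hMj : (0x4FEE3FBF : Nat).testBit j = true := pvBitsLe flags 0x4FEE3FBF j hj
    have hj31 : j < 31 := by
      by_contra h31
      have hlt : (0x4FEE3FBF : Nat) < 2 ^ j :=
        lt_of_lt_of_le (show (0x4FEE3FBF : Nat) < 2 ^ 31 by norm_num)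
          (Nat.pow_le_pow_right (by norm_num) (by omega))
      rw [Nat.testBit_lt_two_pow hlt] at hMj
      exact Bool.false_ne_true hMj
    have hall : ∀ j < 31, (0x4FEE3FBF : Nat).testBit j = true → j ∈ pvTableN.map Prod.fst := by
      decide
    exact hall j hj31 hMj
  rw [hband, pvLoopSpec pvTableN 31 n "" (by norm_num [pvTableN]) (by decide) hbits (by decide)]
  -- A's comprehension filters the same names out of the same table
  have htab : pvFlagNamesA = pvTableN.map (fun p => ((2 : Int) ^ p.1, p.2)) := by decide
  have hMall : ∀ p ∈ pvTableN, (0x4FEE3FBF : Nat).testBit p.1 = true := by decide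
  have hcongr : (pvTableN.filter (fun p => decide
      (PySem.Int.band flags ((2 : Int) ^ p.1) ≠ 0))) =
      pvTableN.filter (fun p => n.testBit p.1) := by
    apply List.filter_congr
    intro p hp
    have hiff := pvBandBitIff flags 0x4FEE3FBF p.1 (hMall p hp)
    rw [← hn] at hiff
    cases hb : n.testBit p.1
    · simp only [decide_eq_false_iff_not]
      intro hcontra
      rw [hiff, hb] at hcontra
      exact Bool.false_ne_true hcontra
    · simp only [decide_eq_true_eq]
      exact hiff.mpr hb
  simp only [htab, List.filter_map, List.map_map, Function.comp_def, hcongr]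
  have hne : ∀ s ∈ (pvTableN.filter (fun p => n.testBit p.1)).map (fun p => p.2), s ≠ "" := by
    intro s hs
    obtain ⟨p, hp, rfl⟩ := List.mem_map.mp hs
    have hall : ∀ p ∈ pvTableN, p.2 ≠ "" := by decide
    exact hall p (List.mem_of_mem_filter hp)
  exact (pvFoldJoin _ hne).symm

-- ===== VERDICT (by name: the statement is the Claim_ definition above) =====
theorem get_unit_flags_string_py_spec : Claim_equal_get_unit_flags_string_py := by
  intro flags _
  unfold Spec_get_unit_flags_string_py
  exact pvMain flags
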